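-- pv_equiv track=rewrite | github.com/jorgechvz/CSE212 | L02/w02_teach/02-teach_algorithms.py | algorithm3
-- ===== SOURCE A (Python) =====
-- def algorithm3(size): # O(log(n))
--     """
--     The count variable is keeping track of the amount
--     of work done in the function.  When the function is
--     done the count is returned.
--     """
--     count = 0
--     start = 0
--     end = size - 1
--     while start <= end:
--         middle = (end - start) // 2 + start
--         start = middle + 1
--         count += 1
--     return count
-- ===== SOURCE B (Python) =====
-- def algorithm3(size): # O(1)
--     # Closed form: the halving loop runs bit_length(size) times for positive
--     # size and never runs otherwise.
--     return size.bit_length() if size > 0 else 0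
-- ===== Notes on version B (the rewrite author's own statement) =====
-- stated objective: faster
-- what changed: Replaced the iterative halving loop with the closed form size.bit_length() for positive size (0 otherwise).
import Mathlib
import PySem

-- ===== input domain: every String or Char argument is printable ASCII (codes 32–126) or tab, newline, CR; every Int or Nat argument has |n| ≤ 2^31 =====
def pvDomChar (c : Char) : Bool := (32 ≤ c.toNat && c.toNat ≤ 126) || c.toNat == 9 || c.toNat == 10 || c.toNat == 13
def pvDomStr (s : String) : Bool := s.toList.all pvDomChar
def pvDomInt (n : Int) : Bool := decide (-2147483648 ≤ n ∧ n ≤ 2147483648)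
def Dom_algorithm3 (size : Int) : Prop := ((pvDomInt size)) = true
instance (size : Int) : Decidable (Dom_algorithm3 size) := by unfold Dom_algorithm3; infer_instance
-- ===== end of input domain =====

-- B replaces the iterative halving loop with the closed form bit_length(size) for positive size (faster: O(1) vs O(log n)).

-- ===== PORT A =====
-- the while loop of A, as structural recursion on the shrinking range
def algorithm3Loop (start e count : Int) : Int :=
  if _h : start ≤ e then
    let middle := PySem.Int.floordiv (e - start) 2 + start
    algorithm3Loop (middle + 1) e (count + 1)
  else count
termination_by (e - start + 1).toNat
decreasing_by
  have h2 : (0:Int) < 2 := by norm_num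
  rw [PySem.Int.floordiv_eq_ediv_of_pos h2]
  omega

def algorithm3 (size : Int) : Int :=
  algorithm3Loop 0 (size - 1) 0

-- ===== PORT B =====
def algorithm3_alt (size : Int) : Int :=
  if size > 0 then (PySem.Int.bitLength size : Int) else 0

-- ===== PRECONDITION & SPEC =====
def Spec_algorithm3 (size : Int) (out : Int) : Prop := out = algorithm3_alt size
instance (size : Int) (out : Int) : Decidable (Spec_algorithm3 size out) := by unfold Spec_algorithm3; infer_instance

-- ===== CLAIM (what is proved, stated in full; the proofs are below) =====
def Claim_equal_algorithm3 : Prop := ∀ (size : Int), Dom_algorithm3 size → Spec_algorithm3 size (algorithm3 size)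

-- ===== LEMMAS AND PROOFS =====

-- the loop adds bitLength of the range length to the count
theorem algorithm3Loop_eq (r : Nat) : ∀ (start e count : Int),
    e - start + 1 = (r : Int) →
    algorithm3Loop start e count = count + (PySem.Int.bitLength (r : Int) : Int) := by
  induction r using Nat.strong_induction_on with
  | _ r ih =>
    intro start e count hr
    rw [algorithm3Loop]
    by_cases h : start ≤ e
    · simp only [h, dif_pos]
      have h2 : (0:Int) < 2 := by norm_num
      rw [PySem.Int.floordiv_eq_ediv_of_pos h2]
      have hrpos : 0 < r := by omega
      have hlt : r / 2 < r := Nat.div_lt_self hrpos (by norm_num)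
      have hr2 : e - (((e - start) / 2 + start) + 1) + 1 = ((r / 2 : Nat) : Int) := by omega
      rw [ih (r / 2) hlt _ _ _ hr2]
      have hb := PySem.Int.bitLength_natCast (m := r) hrpos
      rw [hb]
      push_cast
      ring
    · simp only [h, dif_neg, not_false_iff]
      have hr0 : r = 0 := by omega
      subst hr0
      simp [PySem.Int.bitLength_zero]

-- ===== VERDICT (by name: the statement is the Claim_ definition above) =====
theorem algorithm3_spec : Claim_equal_algorithm3 := by
  intro size _
  unfold Spec_algorithm3 algorithm3 algorithm3_alt
  by_cases h : size > 0
  · have hr : (size - 1) - 0 + 1 = ((size.toNat : Nat) : Int) := by omega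
    rw [algorithm3Loop_eq size.toNat 0 (size - 1) 0 hr]
    have : ((size.toNat : Nat) : Int) = size := by omega
    rw [this]
    simp [h]
  · have hz : size - 1 < 0 := by omega
    rw [algorithm3Loop]
    simp only [show ¬((0:Int) ≤ size - 1) by omega, dif_neg, not_false_iff]
    simp [h]
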